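-- pv_equiv track=rewrite | github.com/Keerthanareddy95/Genetic-Algorithm-Works | Auto TimeTable Generator/app.py | format_timetable
-- ===== SOURCE A (Python) =====
-- from typing import List, Tuple
--
-- DAYS = ["Monday", "Tuesday", "Wednesday", "Thursday", "Friday"]
--
-- TIMES = ["9:00-9:50", "10:00-10:50", "11:00-11:50", "12:00-12:50", "1:40-2:30", "2:40-3:30", "3:40-4:30"]
--
-- Genome = List[Tuple[str, str, str, str, str, str]]
--
-- def format_timetable(genome: Genome, section: str) -> str:
--     timetable = f"Timetable for Section {section}\n"
--     section_genome = [entry for entry in genome if entry[2] == section]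
--
--     for day in DAYS:
--         timetable += f"{day}\n"
--         day_genome = [entry for entry in section_genome if entry[0] == day]
--         for time in TIMES:
--             entry = next((entry for entry in day_genome if entry[1] == time), None)
--             if entry:
--                 timetable += f"{time}: {entry[3]} | {entry[4]} | {entry[5]}\n"
--             else:
--                 timetable += f"{time}: Free\n"
--         timetable += "\n"
--
--     return timetable
-- ===== SOURCE B (Python) =====
-- from typing import List, Tuple
--
-- DAYS = ["Monday", "Tuesday", "Wednesday", "Thursday", "Friday"]
--
-- TIMES = ["9:00-9:50", "10:00-10:50", "11:00-11:50", "12:00-12:50", "1:40-2:30", "2:40-3:30", "3:40-4:30"]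
--
-- Genome = List[Tuple[str, str, str, str, str, str]]
--
-- def format_timetable(genome: Genome, section: str) -> str:
--     # One pass: index the section's entries by (day, time); setdefault keeps the first match.
--     cells = {}
--     for entry in genome:
--         if entry[2] == section:
--             cells.setdefault((entry[0], entry[1]), entry)
--
--     def cell_line(day, time):
--         e = cells.get((day, time))
--         if e is None:
--             return f"{time}: Free"
--         return f"{time}: {e[3]} | {e[4]} | {e[5]}"
--
--     # Assemble the grid as a list of lines and join once at the end.
--     lines = [f"Timetable for Section {section}"]
--     for day in DAYS:
--         lines = lines + [day] + [cell_line(day, time) for time in TIMES] + [""]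
--     return "\n".join(lines) + "\n"
-- ===== Notes on version B (the rewrite author's own statement) =====
-- stated objective: alternative
-- what changed: Replaces per-day filtering and per-time linear scans plus incremental string concatenation with a single pass that indexes the section's entries by (day, time) in a dict (setdefault keeps the first match), then assembles the grid as a list of lines joined once at the end.
import Mathlib
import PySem

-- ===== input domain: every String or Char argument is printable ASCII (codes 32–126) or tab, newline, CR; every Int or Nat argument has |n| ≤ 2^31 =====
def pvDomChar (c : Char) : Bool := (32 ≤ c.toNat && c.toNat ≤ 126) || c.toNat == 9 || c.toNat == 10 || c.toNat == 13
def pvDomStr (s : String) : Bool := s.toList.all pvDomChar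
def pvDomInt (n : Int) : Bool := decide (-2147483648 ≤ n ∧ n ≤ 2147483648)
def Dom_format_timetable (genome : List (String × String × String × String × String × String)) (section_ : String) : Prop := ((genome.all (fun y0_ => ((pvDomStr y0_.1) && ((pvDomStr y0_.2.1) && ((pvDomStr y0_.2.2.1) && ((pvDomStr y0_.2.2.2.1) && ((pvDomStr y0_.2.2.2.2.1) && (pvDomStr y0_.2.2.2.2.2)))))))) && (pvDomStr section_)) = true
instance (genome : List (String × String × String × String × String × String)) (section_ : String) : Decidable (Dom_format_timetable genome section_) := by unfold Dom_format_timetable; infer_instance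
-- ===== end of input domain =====

-- B indexes the section's entries by (day, time) in one pass (setdefault keeps the first match)
-- and assembles the grid as a list of lines joined once, instead of A's per-day filters,
-- per-time scans and incremental string concatenation; same output. Alternative decomposition.

def pvDAYS : List String := ["Monday", "Tuesday", "Wednesday", "Thursday", "Friday"]

def pvTIMES : List String := ["9:00-9:50", "10:00-10:50", "11:00-11:50", "12:00-12:50", "1:40-2:30", "2:40-3:30", "3:40-4:30"]

-- ===== PORT A =====
def format_timetable (genome : List (String × String × String × String × String × String)) (section_ : String) : String :=
  let timetable := "Timetable for Section " ++ section_ ++ "\n"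
  let section_genome := genome.filter (fun entry => entry.2.2.1 == section_)
  pvDAYS.foldl (fun timetable day =>
    let timetable := timetable ++ day ++ "\n"
    let day_genome := section_genome.filter (fun entry => entry.1 == day)
    let timetable := pvTIMES.foldl (fun timetable time =>
      match day_genome.find? (fun entry => entry.2.1 == time) with
      | some entry => timetable ++ time ++ ": " ++ entry.2.2.2.1 ++ " | " ++ entry.2.2.2.2.1 ++ " | " ++ entry.2.2.2.2.2 ++ "\n"
      | none => timetable ++ time ++ ": Free\n") timetable
    timetable ++ "\n") timetable

-- ===== PORT B =====
def format_timetable_alt (genome : List (String × String × String × String × String × String)) (section_ : String) : String :=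
  let cells : PySem.Dict (String × String) (String × String × String × String × String × String) :=
    genome.foldl (fun cells entry =>
      if entry.2.2.1 == section_ then cells.setdefault (entry.1, entry.2.1) entry else cells)
      PySem.Dict.empty
  let cell_line := fun (day time : String) =>
    match cells.get? (day, time) with
    | none => time ++ ": Free"
    | some e => time ++ ": " ++ e.2.2.2.1 ++ " | " ++ e.2.2.2.2.1 ++ " | " ++ e.2.2.2.2.2
  let lines := pvDAYS.foldl (fun lines day =>
    lines ++ [day] ++ pvTIMES.map (fun time => cell_line day time) ++ [""])
    ["Timetable for Section " ++ section_]
  PySem.Str.join "\n" lines ++ "\n"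

-- ===== PRECONDITION & SPEC =====
def Spec_format_timetable (genome : List (String × String × String × String × String × String)) (section_ : String) (out : String) : Prop := out = format_timetable_alt genome section_
instance (genome : List (String × String × String × String × String × String)) (section_ : String) (out : String) : Decidable (Spec_format_timetable genome section_ out) := by unfold Spec_format_timetable; infer_instance

-- ===== CLAIM (what is proved, stated in full; the proofs are below) =====
def Claim_equal_format_timetable : Prop := ∀ (genome : List (String × String × String × String × String × String)) (section_ : String), Dom_format_timetable genome section_ → Spec_format_timetable genome section_ (format_timetable genome section_)

-- ===== LEMMAS AND PROOFS =====

-- Plain concatenation of a list of strings (proof-side helper).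
def pvScat : List String → String
  | [] => ""
  | a :: t => a ++ pvScat t

theorem pvScat_append (x y : List String) : pvScat (x ++ y) = pvScat x ++ pvScat y := by
  induction x with
  | nil => simp [pvScat]
  | cons a t ih => simp [pvScat, ih, String.append_assoc]

-- "\n".join(L) ++ "\n" is the concatenation of the lines each followed by "\n".
theorem join_nl (a : String) (t : List String) :
    PySem.Str.join "\n" (a :: t) ++ "\n" = a ++ "\n" ++ pvScat (t.map (· ++ "\n")) := by
  induction t generalizing a with
  | nil =>
    simp [PySem.Str.join, PySem.Chars.join, pvScat]
    apply String.ext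
    simp [List.intercalate]
  | cons b t ih =>
    have hc : PySem.Str.join "\n" (a :: b :: t) = a ++ "\n" ++ PySem.Str.join "\n" (b :: t) := by
      apply String.ext
      simp [PySem.Str.toList_join, PySem.Chars.join_cons_cons]
    rw [hc, String.append_assoc, String.append_assoc, ih b]
    simp [pvScat, String.append_assoc]

-- A setdefault-fold over a list indexes it by first match: looking up k yields the first element whose key is k.
theorem get?_foldl_setdefault {κ ν : Type} [BEq κ] [LawfulBEq κ] (key : ν → κ)
    (l : List ν) (d : PySem.Dict κ ν) (k : κ) :
    (l.foldl (fun d e => d.setdefault (key e) e) d).get? k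
      = (d.get? k).or (l.find? (fun e => key e == k)) := by
  induction l generalizing d with
  | nil => simp
  | cons e t ih =>
    simp only [List.foldl_cons, ih, List.find?_cons]
    cases hc : d.contains (key e) with
    | true =>
      rw [PySem.Dict.setdefault_of_contains d e hc]
      cases hk : (key e == k) with
      | true =>
        have : d.get? k = d.get? (key e) := by rw [eq_of_beq hk]
        have hs : (d.get? k).isSome := by
          rw [this, ← PySem.Dict.contains_eq_isSome_get?, hc]
        cases h : d.get? k with
        | none => rw [h] at hs; simp at hs
        | some v => simp [Option.or]
      | false => rfl
    | false =>
      rw [PySem.Dict.setdefault_of_not_contains d e hc]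
      cases hk : (key e == k) with
      | true =>
        have hke : key e = k := eq_of_beq hk
        have hn : d.get? k = none := by
          rw [← hke, PySem.Dict.get?_eq_none_iff_contains, hc]
        rw [hke, PySem.Dict.get?_insert_self, hn]
        simp [Option.or]
      | false =>
        have hne : k ≠ key e := fun h => by subst h; simp at hk
        rw [PySem.Dict.get?_insert_of_ne d e hne]

-- find? after filter is find? of the conjunction.
theorem find?_filter_and {α : Type} (l : List α) (p q : α → Bool) :
    (l.filter p).find? q = l.find? (fun x => p x && q x) := by
  induction l with
  | nil => rfl
  | cons x t ih =>
    by_cases hp : p x = true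
    · by_cases hq : q x = true
      · simp [hp, hq]
      · simp [hp, hq, ih]
    · simp [hp, ih]

-- The cell chosen by B's index equals the cell chosen by A's nested scans.
theorem cells_eq_scan (genome : List (String × String × String × String × String × String))
    (section_ day time : String) :
    (genome.foldl (fun cells entry =>
        if entry.2.2.1 == section_ then cells.setdefault (entry.1, entry.2.1) entry else cells)
        PySem.Dict.empty).get? (day, time)
      = ((genome.filter (fun entry => entry.2.2.1 == section_)).filter
          (fun entry => entry.1 == day)).find? (fun entry => entry.2.1 == time) := by
  have hif := PySem.List.foldl_if_eq_foldl_filter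
    (fun entry : String × String × String × String × String × String => entry.2.2.1 == section_)
    (fun cells entry => cells.setdefault (entry.1, entry.2.1) entry) genome
    (PySem.Dict.empty (κ := String × String))
  have hsd := get?_foldl_setdefault
    (key := fun e : String × String × String × String × String × String => (e.1, e.2.1))
    (genome.filter (fun entry => entry.2.2.1 == section_)) PySem.Dict.empty (day, time)
  rw [hif, hsd]
  conv_rhs => rw [find?_filter_and]
  simp only [PySem.Dict.get?_empty, Option.or]
  congr 1


-- The line printed for one cell, as a function of the entry found there (proof-side helper).
def pvEntryStr (time : String) (o : Option (String × String × String × String × String × String)) : String :=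
  match o with
  | none => time ++ ": Free"
  | some e => time ++ ": " ++ e.2.2.2.1 ++ " | " ++ e.2.2.2.2.1 ++ " | " ++ e.2.2.2.2.2

theorem pvScat_flatMap {α : Type} (g : α → List String) (l : List α) :
    pvScat (l.flatMap g) = pvScat (l.map (fun x => pvScat (g x))) := by
  induction l with
  | nil => rfl
  | cons a t ih => simp [List.flatMap_cons, pvScat_append, pvScat, ih]

-- A foldl that appends three pieces per element is the flat list of those pieces.
theorem foldl_app3 {α β : Type} (p q r : α → List β) (l : List α) (acc : List β) :
    l.foldl (fun acc x => acc ++ p x ++ q x ++ r x) acc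
      = acc ++ l.flatMap (fun x => p x ++ q x ++ r x) := by
  induction l generalizing acc with
  | nil => simp
  | cons a t ih => simp [List.foldl_cons, List.flatMap_def]

theorem foldlA_inner (dg : List (String × String × String × String × String × String))
    (times : List String) (acc : String) :
    times.foldl (fun timetable time =>
      match dg.find? (fun entry => entry.2.1 == time) with
      | some entry => timetable ++ time ++ ": " ++ entry.2.2.2.1 ++ " | " ++ entry.2.2.2.2.1 ++ " | " ++ entry.2.2.2.2.2 ++ "\n"
      | none => timetable ++ time ++ ": Free\n") acc
    = acc ++ pvScat (times.map (fun time =>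
        pvEntryStr time (dg.find? (fun entry => entry.2.1 == time)) ++ "\n")) := by
  induction times generalizing acc with
  | nil => simp [pvScat]
  | cons time rest ih =>
    simp only [List.foldl_cons, List.map_cons, pvScat]
    rw [ih]
    cases h : dg.find? (fun entry => entry.2.1 == time) with
    | none => simp [pvEntryStr, String.append_assoc]
    | some e => simp [pvEntryStr, String.append_assoc]

theorem foldlA_outer (dgf : String → List (String × String × String × String × String × String))
    (days times : List String) (acc : String) :
    days.foldl (fun timetable day =>
      (times.foldl (fun timetable time =>
        match (dgf day).find? (fun entry => entry.2.1 == time) with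
        | some entry => timetable ++ time ++ ": " ++ entry.2.2.2.1 ++ " | " ++ entry.2.2.2.2.1 ++ " | " ++ entry.2.2.2.2.2 ++ "\n"
        | none => timetable ++ time ++ ": Free\n") (timetable ++ day ++ "\n")) ++ "\n") acc
    = acc ++ pvScat (days.map (fun day =>
        day ++ "\n" ++ pvScat (times.map (fun time =>
          pvEntryStr time ((dgf day).find? (fun entry => entry.2.1 == time)) ++ "\n")) ++ "\n")) := by
  induction days generalizing acc with
  | nil => simp [pvScat]
  | cons day rest ih =>
    simp only [List.foldl_cons, List.map_cons, pvScat]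
    rw [foldlA_inner, ih]
    simp [String.append_assoc]

-- B's inline match on the looked-up cell is pvEntryStr.
theorem entry_match_eq (time : String) (o : Option (String × String × String × String × String × String)) :
    (match o with
     | none => time ++ ": Free"
     | some e => time ++ ": " ++ e.2.2.2.1 ++ " | " ++ e.2.2.2.2.1 ++ " | " ++ e.2.2.2.2.2)
    = pvEntryStr time o := by
  cases o <;> rfl

theorem main_eq (genome : List (String × String × String × String × String × String))
    (section_ : String) :
    format_timetable genome section_ = format_timetable_alt genome section_ := by
  unfold format_timetable format_timetable_alt
  dsimp only
  simp only [cells_eq_scan genome section_, entry_match_eq]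
  rw [foldlA_outer (fun day => (genome.filter (fun entry => entry.2.2.1 == section_)).filter
      (fun entry => entry.1 == day))]
  rw [foldl_app3 (fun day => [day]) (fun day => pvTIMES.map _) (fun _ => [""])]
  rw [List.singleton_append, join_nl]
  rw [List.map_flatMap, pvScat_flatMap]
  simp only [List.map_append, List.map_cons, List.map_nil, List.map_map, Function.comp_def,
    pvScat_append, pvScat, String.append_assoc, String.append_empty, String.empty_append]

-- ===== VERDICT (by name: the statement is the Claim_ definition above) =====
theorem format_timetable_spec : Claim_equal_format_timetable := by
  intro genome section_ _
  unfold Spec_format_timetable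
  exact main_eq genome section_
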